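-- pv_equiv track=rewrite | github.com/Parssayousefi/COPBET_Python | functions/CopBET_time_series_complexity.py | cpr
-- ===== SOURCE A (Python) =====
-- def cpr(string):
--     """
--     Lempel-Ziv-Welch compression of binary input string, e.g. string='0010101'.
--     It outputs the size of the dictionary of binary words.
--
--     Adapted from Schartner's Python code
--     https://github.com/mschart/SignalDiversity/blob/master/LZ_Spectral.py
--     """
--     d = set()
--     w = ''
--     count = 1
--     for c in string:
--         wc = w + c
--         if wc in d:
--             w = wc
--         else:
--             d.add(wc)
--             count += 1
--             w = c
--     return len(d)
-- ===== SOURCE B (Python) =====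
-- def cpr(string):
--     """LZW dictionary-size via an id-based trie: one dict step per character, O(n) expected."""
--     trans = {}   # (node_id, char) -> child_id; node 0 is the root (empty word)
--     marked = set()  # ids of words that are in the LZW dictionary
--     nxt = 1
--     cur = 0
--     count = 0
--     for c in string:
--         child = trans.get((cur, c))
--         if child is not None and child in marked:
--             cur = child
--         else:
--             if child is None:
--                 child = nxt
--                 nxt += 1
--                 trans[(cur, c)] = child
--             marked.add(child)
--             count += 1
--             r = trans.get((0, c))
--             if r is None:
--                 r = nxt
--                 nxt += 1
--                 trans[(0, c)] = r
--             cur = r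
--     return count
-- ===== Notes on version B (the rewrite author's own statement) =====
-- stated objective: alternative
-- what changed: Replaces A's set of explicitly concatenated phrase strings by an id-based trie (a dict keyed by (node id, char) plus a set of marked node ids) advanced one dict step per character, so phrase strings are never built or hashed.
import Mathlib
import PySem

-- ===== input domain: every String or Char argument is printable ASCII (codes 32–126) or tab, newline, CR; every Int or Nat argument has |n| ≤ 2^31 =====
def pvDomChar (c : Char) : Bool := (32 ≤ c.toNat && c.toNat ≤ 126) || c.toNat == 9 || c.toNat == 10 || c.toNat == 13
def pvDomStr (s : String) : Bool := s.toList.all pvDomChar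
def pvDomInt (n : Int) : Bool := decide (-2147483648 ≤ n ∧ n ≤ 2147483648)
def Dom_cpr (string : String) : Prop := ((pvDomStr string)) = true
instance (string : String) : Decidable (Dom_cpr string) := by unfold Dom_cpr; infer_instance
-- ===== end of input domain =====

-- B replaces A's set of growing phrase strings by an id-based trie (a dict keyed by
-- (node id, char) plus a set of marked node ids) walked one step per character, so the
-- phrase strings are never materialised (alternative algorithm).

-- ===== PORT A =====
-- A's loop state (d, w, count); w is ported as List Char, wc = w + c is w ++ [c].
def cprStep (st : PySem.Set (List Char) × List Char × Int) (c : Char) :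
    PySem.Set (List Char) × List Char × Int :=
  match st with
  | (d, w, count) =>
    let wc := w ++ [c]
    if PySem.Set.contains d wc then (d, wc, count)
    else (PySem.Set.add d wc, [c], count + 1)

def cpr (string : String) : Int :=
  ((string.toList.foldl cprStep (PySem.Set.empty, [], 1)).1.length : Int)

-- ===== PORT B =====
-- B's loop state (trans, marked, nxt, cur, count); node 0 is the root.
-- Python's else-block after the possible child creation: mark, count, step to root's child.
def cprAltElse (tr : PySem.Dict (Int × Char) Int) (marked : PySem.Set Int)
    (nxt count child : Int) (c : Char) :
    PySem.Dict (Int × Char) Int × PySem.Set Int × Int × Int × Int :=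
  let marked := PySem.Set.add marked child
  let count := count + 1
  match tr.get? (0, c) with
  | some r => (tr, marked, nxt, r, count)
  | none => (tr.insert (0, c) nxt, marked, nxt + 1, nxt, count)

def cprAltStep (st : PySem.Dict (Int × Char) Int × PySem.Set Int × Int × Int × Int) (c : Char) :
    PySem.Dict (Int × Char) Int × PySem.Set Int × Int × Int × Int :=
  match st with
  | (tr, marked, nxt, cur, count) =>
    match tr.get? (cur, c) with
    | some child =>
      if PySem.Set.contains marked child then (tr, marked, nxt, child, count)
      else cprAltElse tr marked nxt count child c
    | none => cprAltElse (tr.insert (cur, c) nxt) marked (nxt + 1) count nxt c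

def cpr_alt (string : String) : Int :=
  (string.toList.foldl cprAltStep (PySem.Dict.empty, PySem.Set.empty, 1, 0, 0)).2.2.2.2

-- ===== PRECONDITION & SPEC =====
def Spec_cpr (string : String) (out : Int) : Prop := out = cpr_alt string
instance (string : String) (out : Int) : Decidable (Spec_cpr string out) := by unfold Spec_cpr; infer_instance

-- ===== CLAIM (what is proved, stated in full; the proofs are below) =====
def Claim_equal_cpr : Prop := ∀ (string : String), Dom_cpr string → Spec_cpr string (cpr string)

-- ===== LEMMAS AND PROOFS =====

def addr (t : PySem.Dict (Int × Char) Int) (s : List Char) : Option Int :=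
  s.foldl (fun o c => o.bind fun n => t.get? (n, c)) (some 0)

theorem addr_nil (t : PySem.Dict (Int × Char) Int) : addr t [] = some 0 := rfl

theorem addr_append (t : PySem.Dict (Int × Char) Int) (s : List Char) (c : Char) :
    addr t (s ++ [c]) = (addr t s).bind fun n => t.get? (n, c) := by
  simp [addr, List.foldl_append]

theorem addr_mono (t : PySem.Dict (Int × Char) Int) (k : Int × Char) (v : Int)
    (hk : t.get? k = none) :
    ∀ (s : List Char) (n : Int), addr t s = some n → addr (t.insert k v) s = some n := by
  intro s
  induction s using List.reverseRecOn with
  | nil => intro n h; simpa [addr] using h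
  | append_singleton s c ih =>
    intro n h
    rw [addr_append] at h ⊢
    cases hs : addr t s with
    | none => rw [hs] at h; simp at h
    | some m =>
      rw [hs] at h; simp at h
      rw [ih m hs]; simp
      have hne : (m, c) ≠ k := by rintro rfl; rw [hk] at h; simp at h
      rw [PySem.Dict.get?_insert_of_ne _ _ hne]; exact h

theorem addr_cases (t : PySem.Dict (Int × Char) Int) (s : List Char) (n : Int)
    (h : addr t s = some n) : n = 0 ∨ ∃ k, t.get? k = some n := by
  induction s using List.reverseRecOn with
  | nil => left; simpa [addr] using h.symm
  | append_singleton s c ih =>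
    rw [addr_append] at h
    cases hs : addr t s with
    | none => rw [hs] at h; simp at h
    | some m => rw [hs] at h; simp at h; right; exact ⟨(m, c), h⟩

theorem addr_back (t : PySem.Dict (Int × Char) Int) (k : Int × Char) (nxt : Int)
    (hk : t.get? k = none)
    (hb : ∀ k' v', t.get? k' = some v' → v' < nxt ∧ k'.1 < nxt)
    (hk1 : k.1 < nxt) :
    ∀ (s : List Char) (n : Int), addr (t.insert k nxt) s = some n →
      addr t s = some n ∨ (n = nxt ∧ ∃ s₀, s = s₀ ++ [k.2] ∧ addr t s₀ = some k.1) := by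
  intro s
  induction s using List.reverseRecOn with
  | nil => intro n h; left; simpa [addr] using h
  | append_singleton s c ih =>
    intro n h
    rw [addr_append] at h
    cases hs : addr (t.insert k nxt) s with
    | none => rw [hs] at h; simp at h
    | some m =>
      rw [hs] at h; simp at h
      rcases ih m hs with hm | ⟨hmn, s₀, hseq, hs₀⟩
      · -- path avoided the new node so far
        by_cases hkc : (m, c) = k
        · subst hkc
          rw [PySem.Dict.get?_insert_self] at h
          right
          exact ⟨by simpa using h.symm, s, rfl, by simpa using hm⟩
        · rw [PySem.Dict.get?_insert_of_ne _ _ hkc] at h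
          left; rw [addr_append, hm]; simpa using h
      · -- path currently at the fresh node nxt: it has no outgoing edge
        exfalso
        by_cases hkc : (m, c) = k
        · have : k.1 = m := by rw [← hkc]
          omega
        · rw [PySem.Dict.get?_insert_of_ne _ _ hkc] at h
          have := (hb _ _ h).2
          simp at this
          omega

theorem addr_inj (t : PySem.Dict (Int × Char) Int)
    (hpos : ∀ k v, t.get? k = some v → 1 ≤ v)
    (hinj : ∀ k1 k2 v, t.get? k1 = some v → t.get? k2 = some v → k1 = k2) :
    ∀ (s s' : List Char) (n : Int), addr t s = some n → addr t s' = some n → s = s' := by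
  intro s
  induction s using List.reverseRecOn with
  | nil =>
    intro s' n h h'
    have hn : n = 0 := by simpa [addr] using h.symm
    subst hn
    cases s' using List.reverseRecOn with
    | nil => rfl
    | append_singleton s' c =>
      rw [addr_append] at h'
      cases hs : addr t s' with
      | none => rw [hs] at h'; simp at h'
      | some m => rw [hs] at h'; simp at h'; exact absurd (hpos _ _ h') (by omega)
  | append_singleton s c ih =>
    intro s' n h h'
    rw [addr_append] at h
    cases hs : addr t s with
    | none => rw [hs] at h; simp at h
    | some m =>
      rw [hs] at h; simp at h
      cases s' using List.reverseRecOn with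
      | nil =>
        have hn : n = 0 := by simpa [addr] using h'.symm
        exact absurd (hpos _ _ (hn ▸ h)) (by omega)
      | append_singleton s' c' =>
        rw [addr_append] at h'
        cases hs' : addr t s' with
        | none => rw [hs'] at h'; simp at h'
        | some m' =>
          rw [hs'] at h'; simp at h'
          have := hinj _ _ _ h h'
          obtain ⟨rfl, rfl⟩ := Prod.mk.injEq .. |>.mp this
          rw [ih _ _ hs hs']

def CInv (d : PySem.Set (List Char)) (w : List Char) (t : PySem.Dict (Int × Char) Int)
    (mk : PySem.Set Int) (nxt cur count : Int) : Prop :=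
  count = (d.length : Int) ∧
  addr t w = some cur ∧
  (∀ s : List Char, s ∈ d ↔ ∃ n, addr t s = some n ∧ n ∈ mk) ∧
  (∀ k v, t.get? k = some v → 1 ≤ v ∧ v < nxt ∧ 0 ≤ k.1 ∧ k.1 < nxt) ∧
  (∀ k1 k2 v, t.get? k1 = some v → t.get? k2 = some v → k1 = k2) ∧
  (∀ m ∈ mk, ∃ k, t.get? k = some m) ∧
  1 ≤ nxt

theorem mem_set_add_iff {α : Type} [BEq α] [LawfulBEq α] (s : PySem.Set α) (x y : α) :
    y ∈ PySem.Set.add s x ↔ y ∈ s ∨ y = x := by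
  by_cases h : PySem.Set.contains s x = true
  · simp only [PySem.Set.add, h, if_pos]
    constructor
    · exact Or.inl
    · rintro (hy | rfl)
      · exact hy
      · exact (PySem.Set.contains_iff _ _).mp h
  · simp only [PySem.Set.add, h, Bool.not_eq_true] at *
    simp [h]

theorem len_set_add_of_not_mem {α : Type} [BEq α] [LawfulBEq α] (s : PySem.Set α) (x : α)
    (h : x ∉ s) : (PySem.Set.add s x).length = s.length + 1 := by
  have hc : PySem.Set.contains s x = false := by
    rw [← Bool.not_eq_true, PySem.Set.contains_iff]; exact h
  simp only [PySem.Set.add, hc, Bool.false_eq_true, if_false]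
  simp

theorem elseInv (d : PySem.Set (List Char)) (w : List Char)
    (t : PySem.Dict (Int × Char) Int) (mk : PySem.Set Int)
    (nxt cur count child : Int) (c : Char)
    (hc : count = (d.length : Int))
    (ha : addr t w = some cur)
    (hd : ∀ s : List Char, s ∈ d ↔ ∃ n, addr t s = some n ∧ n ∈ mk)
    (hb : ∀ k v, t.get? k = some v → 1 ≤ v ∧ v < nxt ∧ 0 ≤ k.1 ∧ k.1 < nxt)
    (hj : ∀ k1 k2 v, t.get? k1 = some v → t.get? k2 = some v → k1 = k2)
    (hm : ∀ m ∈ mk, ∃ k, t.get? k = some m)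
    (hn : 1 ≤ nxt)
    (hchild : t.get? (cur, c) = some child)
    (hnm : child ∉ mk) :
    CInv (PySem.Set.add d (w ++ [c])) [c]
      (cprAltElse t mk nxt count child c).1
      (cprAltElse t mk nxt count child c).2.1
      (cprAltElse t mk nxt count child c).2.2.1
      (cprAltElse t mk nxt count child c).2.2.2.1
      (cprAltElse t mk nxt count child c).2.2.2.2 := by
  have hpos : ∀ k v, t.get? k = some v → 1 ≤ v := fun k v h => (hb k v h).1
  have hbv : ∀ k v, t.get? k = some v → v < nxt ∧ k.1 < nxt :=
    fun k v h => ⟨(hb k v h).2.1, (hb k v h).2.2.2⟩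
  have hwc : addr t (w ++ [c]) = some child := by
    rw [addr_append, ha]; simpa using hchild
  have hwcd : (w ++ [c]) ∉ d := by
    intro hmem
    rcases (hd _).mp hmem with ⟨n, hn1, hn2⟩
    rw [hwc] at hn1
    exact hnm (by injection hn1 with h; exact h ▸ hn2)
  have hcount : count + 1 = ((PySem.Set.add d (w ++ [c])).length : Int) := by
    rw [len_set_add_of_not_mem _ _ hwcd]; push_cast; omega
  have hmem' : ∀ s : List Char,
      s ∈ PySem.Set.add d (w ++ [c]) ↔ ∃ n, addr t s = some n ∧ n ∈ PySem.Set.add mk child := by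
    intro s
    rw [mem_set_add_iff, hd]
    constructor
    · rintro (⟨n, h1, h2⟩ | rfl)
      · exact ⟨n, h1, (mem_set_add_iff _ _ _).mpr (Or.inl h2)⟩
      · exact ⟨child, hwc, (mem_set_add_iff _ _ _).mpr (Or.inr rfl)⟩
    · rintro ⟨n, h1, h2⟩
      rcases (mem_set_add_iff _ _ _).mp h2 with h2 | rfl
      · exact Or.inl ⟨n, h1, h2⟩
      · exact Or.inr (addr_inj t hpos hj _ _ _ h1 hwc)
  have hmk' : ∀ m ∈ PySem.Set.add mk child, ∃ k, t.get? k = some m := by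
    intro m hmm
    rcases (mem_set_add_iff _ _ _).mp hmm with h | rfl
    · exact hm m h
    · exact ⟨(cur, c), hchild⟩
  cases hr : t.get? (0, c) with
  | some r =>
    simp only [cprAltElse, hr]
    refine ⟨hcount, ?_, hmem', hb, hj, hmk', hn⟩
    rw [show ([c] : List Char) = [] ++ [c] by rfl, addr_append, addr_nil]
    simpa using hr
  | none =>
    simp only [cprAltElse, hr]
    have hub : ∀ k' v', t.get? k' = some v' → v' < nxt ∧ k'.1 < nxt := hbv
    refine ⟨hcount, ?_, ?_, ?_, ?_, ?_, by omega⟩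
    · rw [show ([c] : List Char) = [] ++ [c] by rfl, addr_append, addr_nil]
      simp [PySem.Dict.get?_insert_self]
    · -- membership transfers across the fresh insert
      intro s
      rw [hmem' s]
      constructor
      · rintro ⟨n, h1, h2⟩
        exact ⟨n, addr_mono t _ _ hr _ _ h1, h2⟩
      · rintro ⟨n, h1, h2⟩
        rcases addr_back t (0, c) nxt hr hub (by simpa using hn) _ _ h1 with h1' | ⟨rfl, _⟩
        · exact ⟨n, h1', h2⟩
        · exfalso
          rcases (mem_set_add_iff _ _ _).mp h2 with h2 | rfl
          · rcases hm _ h2 with ⟨k, hk⟩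
            exact absurd (hbv _ _ hk).1 (by omega)
          · exact absurd (hbv _ _ hchild).1 (by omega)
    · -- bounds
      intro k v hkv
      by_cases hkc : k = (0, c)
      · subst hkc
        rw [PySem.Dict.get?_insert_self] at hkv
        injection hkv with hv
        subst hv
        refine ⟨by omega, by omega, by simp, by simp; omega⟩
      · rw [PySem.Dict.get?_insert_of_ne _ _ hkc] at hkv
        have := hb _ _ hkv
        exact ⟨this.1, by omega, this.2.2.1, by omega⟩
    · -- injectivity
      intro k1 k2 v h1 h2
      by_cases h1c : k1 = (0, c) <;> by_cases h2c : k2 = (0, c)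
      · rw [h1c, h2c]
      · subst h1c
        rw [PySem.Dict.get?_insert_self] at h1
        rw [PySem.Dict.get?_insert_of_ne _ _ h2c] at h2
        injection h1 with hv
        exact absurd ((hbv _ _ h2).1) (by omega)
      · subst h2c
        rw [PySem.Dict.get?_insert_self] at h2
        rw [PySem.Dict.get?_insert_of_ne _ _ h1c] at h1
        injection h2 with hv
        exact absurd ((hbv _ _ h1).1) (by omega)
      · rw [PySem.Dict.get?_insert_of_ne _ _ h1c] at h1
        rw [PySem.Dict.get?_insert_of_ne _ _ h2c] at h2
        exact hj _ _ _ h1 h2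
    · -- marked witnesses
      intro m hmm
      rcases hmk' m hmm with ⟨k, hk⟩
      refine ⟨k, ?_⟩
      have hkc : k ≠ (0, c) := by rintro rfl; rw [hk] at hr; simp at hr
      rw [PySem.Dict.get?_insert_of_ne _ _ hkc]; exact hk

theorem inv_step (d : PySem.Set (List Char)) (w : List Char) (cntA : Int)
    (t : PySem.Dict (Int × Char) Int) (mk : PySem.Set Int) (nxt cur count : Int) (c : Char)
    (h : CInv d w t mk nxt cur count) :
    CInv (cprStep (d, w, cntA) c).1 (cprStep (d, w, cntA) c).2.1
      (cprAltStep (t, mk, nxt, cur, count) c).1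
      (cprAltStep (t, mk, nxt, cur, count) c).2.1
      (cprAltStep (t, mk, nxt, cur, count) c).2.2.1
      (cprAltStep (t, mk, nxt, cur, count) c).2.2.2.1
      (cprAltStep (t, mk, nxt, cur, count) c).2.2.2.2 := by
  obtain ⟨hc, ha, hd, hb, hj, hm, hn⟩ := h
  have hwc : addr t (w ++ [c]) = t.get? (cur, c) := by
    rw [addr_append, ha]; rfl
  cases htc : t.get? (cur, c) with
  | some child =>
    by_cases hmk : PySem.Set.contains mk child = true
    · -- wc is already a known phrase: both sides just advance
      have hcd : PySem.Set.contains d (w ++ [c]) = true := by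
        rw [PySem.Set.contains_iff, hd]
        exact ⟨child, hwc.trans htc, (PySem.Set.contains_iff _ _).mp hmk⟩
      simp only [cprStep, cprAltStep, htc, hcd, hmk, if_true]
      exact ⟨hc, hwc.trans htc, hd, hb, hj, hm, hn⟩
    · -- new phrase, node already allocated
      have hnm : child ∉ mk := fun hx => hmk ((PySem.Set.contains_iff _ _).mpr hx)
      have hcd : PySem.Set.contains d (w ++ [c]) = false := by
        rw [← Bool.not_eq_true, PySem.Set.contains_iff, hd]
        rintro ⟨n, h1, h2⟩
        rw [hwc, htc] at h1
        injection h1 with h1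
        exact hnm (h1 ▸ h2)
      simp only [cprStep, cprAltStep, htc, hcd, hmk, Bool.false_eq_true, if_false]
      exact elseInv d w t mk nxt cur count child c hc ha hd hb hj hm hn htc hnm
  | none =>
    -- new phrase, fresh node
    have hcd : PySem.Set.contains d (w ++ [c]) = false := by
      rw [← Bool.not_eq_true, PySem.Set.contains_iff, hd]
      rintro ⟨n, h1, h2⟩
      rw [hwc, htc] at h1
      simp at h1
    have hcur : 0 ≤ cur ∧ cur < nxt := by
      rcases addr_cases t w cur ha with rfl | ⟨k, hk⟩
      · omega
      · have := hb _ _ hk; omega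
    have hub : ∀ k' v', t.get? k' = some v' → v' < nxt ∧ k'.1 < nxt :=
      fun k v hkv => ⟨(hb k v hkv).2.1, (hb k v hkv).2.2.2⟩
    have hnmk : nxt ∉ mk := by
      intro hx
      rcases hm _ hx with ⟨k, hk⟩
      exact absurd (hb _ _ hk).2.1 (by omega)
    have ha₁ : addr (t.insert (cur, c) nxt) w = some cur := addr_mono t _ _ htc w cur ha
    have hd₁ : ∀ s : List Char, s ∈ d ↔ ∃ n, addr (t.insert (cur, c) nxt) s = some n ∧ n ∈ mk := by
      intro s
      rw [hd]
      constructor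
      · rintro ⟨n, h1, h2⟩; exact ⟨n, addr_mono t _ _ htc _ _ h1, h2⟩
      · rintro ⟨n, h1, h2⟩
        rcases addr_back t (cur, c) nxt htc hub (by simpa using hcur.2) _ _ h1 with h1' | ⟨rfl, _⟩
        · exact ⟨n, h1', h2⟩
        · exact absurd h2 hnmk
    have hb₁ : ∀ k v, (t.insert (cur, c) nxt).get? k = some v →
        1 ≤ v ∧ v < nxt + 1 ∧ 0 ≤ k.1 ∧ k.1 < nxt + 1 := by
      intro k v hkv
      by_cases hkc : k = (cur, c)
      · subst hkc
        rw [PySem.Dict.get?_insert_self] at hkv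
        injection hkv with hv
        subst hv
        exact ⟨by omega, by omega, by simpa using hcur.1, by simp; omega⟩
      · rw [PySem.Dict.get?_insert_of_ne _ _ hkc] at hkv
        have := hb _ _ hkv
        exact ⟨this.1, by omega, this.2.2.1, by omega⟩
    have hj₁ : ∀ k1 k2 v, (t.insert (cur, c) nxt).get? k1 = some v →
        (t.insert (cur, c) nxt).get? k2 = some v → k1 = k2 := by
      intro k1 k2 v h1 h2
      by_cases h1c : k1 = (cur, c) <;> by_cases h2c : k2 = (cur, c)
      · rw [h1c, h2c]
      · subst h1c
        rw [PySem.Dict.get?_insert_self] at h1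
        rw [PySem.Dict.get?_insert_of_ne _ _ h2c] at h2
        injection h1 with hv
        exact absurd ((hub _ _ h2).1) (by omega)
      · subst h2c
        rw [PySem.Dict.get?_insert_self] at h2
        rw [PySem.Dict.get?_insert_of_ne _ _ h1c] at h1
        injection h2 with hv
        exact absurd ((hub _ _ h1).1) (by omega)
      · rw [PySem.Dict.get?_insert_of_ne _ _ h1c] at h1
        rw [PySem.Dict.get?_insert_of_ne _ _ h2c] at h2
        exact hj _ _ _ h1 h2
    have hm₁ : ∀ m ∈ mk, ∃ k, (t.insert (cur, c) nxt).get? k = some m := by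
      intro m hx
      rcases hm _ hx with ⟨k, hk⟩
      have hkc : k ≠ (cur, c) := by rintro rfl; rw [hk] at htc; simp at htc
      exact ⟨k, by rw [PySem.Dict.get?_insert_of_ne _ _ hkc]; exact hk⟩
    simp only [cprStep, cprAltStep, htc, hcd, Bool.false_eq_true, if_false]
    exact elseInv d w (t.insert (cur, c) nxt) mk (nxt + 1) cur count nxt c hc ha₁ hd₁ hb₁
      hj₁ hm₁ (by omega) (PySem.Dict.get?_insert_self _ _ _) hnmk

theorem foldl_inv : ∀ (l : List Char) (d : PySem.Set (List Char)) (w : List Char) (cntA : Int)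
    (t : PySem.Dict (Int × Char) Int) (mk : PySem.Set Int) (nxt cur count : Int),
    CInv d w t mk nxt cur count →
    (l.foldl cprAltStep (t, mk, nxt, cur, count)).2.2.2.2 =
      ((l.foldl cprStep (d, w, cntA)).1.length : Int) := by
  intro l
  induction l with
  | nil => intro d w cntA t mk nxt cur count h; exact h.1
  | cons c l ih =>
    intro d w cntA t mk nxt cur count h
    simp only [List.foldl_cons]
    exact ih _ _ _ _ _ _ _ _ (inv_step d w cntA t mk nxt cur count c h)

theorem cinv_init : CInv PySem.Set.empty [] PySem.Dict.empty PySem.Set.empty 1 0 0 := by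
  refine ⟨by simp [PySem.Set.empty], addr_nil _, ?_, ?_, ?_, ?_, by omega⟩
  · intro s; simp [PySem.Set.empty]
  · intro k v hkv; simp [PySem.Dict.get?_empty] at hkv
  · intro k1 k2 v h1 h2; simp [PySem.Dict.get?_empty] at h1
  · intro m hm; simp [PySem.Set.empty] at hm

-- ===== VERDICT (by name: the statement is the Claim_ definition above) =====
theorem cpr_spec : Claim_equal_cpr := by
  intro s _
  unfold Spec_cpr cpr cpr_alt
  exact (foldl_inv s.toList PySem.Set.empty [] 1 PySem.Dict.empty PySem.Set.empty 1 0 0 cinv_init).symm
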